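-- pv_equiv track=rewrite | github.com/daniel-reich/ubiquitous-fiesta | CdcS3feCCEHxtDr2a_2.py | clear_ordering
-- ===== SOURCE A (Python) =====
-- def clear_ordering(lst):
--     firstDict = {}
--     secondDict = {}
--     for item in lst:
--         if item[0] in firstDict:
--             firstDict[item[0]] += 1
--         else:
--             firstDict[item[0]] = 1
--         if item[1] in secondDict:
--             secondDict[item[1]] += 1
--         else:
--             secondDict[item[1]] = 1
--     for item in firstDict:
--         if firstDict[item] > 1:
--             return False
--     for item in secondDict:
--         if secondDict[item] > 1:
--             return False
--     return True
-- ===== SOURCE B (Python) =====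
-- def clear_ordering(lst):
--     for col in (0, 1):
--         vals = sorted(item[col] for item in lst)
--         for i in range(1, len(vals)):
--             if vals[i - 1] == vals[i]:
--                 return False
--     return True
-- ===== Notes on version B (the rewrite author's own statement) =====
-- stated objective: alternative
-- what changed: B decides uniqueness per column by sorting the column and scanning for an equal adjacent pair, instead of building count dictionaries and re-scanning them for counts above one.
import Mathlib
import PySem

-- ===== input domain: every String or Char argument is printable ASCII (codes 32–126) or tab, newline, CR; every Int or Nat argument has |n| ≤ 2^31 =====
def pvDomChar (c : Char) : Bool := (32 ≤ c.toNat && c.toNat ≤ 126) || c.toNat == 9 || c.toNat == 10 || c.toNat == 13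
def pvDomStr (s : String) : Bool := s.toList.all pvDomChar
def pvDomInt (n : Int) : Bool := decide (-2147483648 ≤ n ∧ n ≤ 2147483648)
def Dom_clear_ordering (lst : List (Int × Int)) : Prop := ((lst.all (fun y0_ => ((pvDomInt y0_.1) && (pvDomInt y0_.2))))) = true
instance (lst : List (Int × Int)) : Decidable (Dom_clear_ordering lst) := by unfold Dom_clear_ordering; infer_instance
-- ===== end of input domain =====

-- B decides uniqueness per column by sorting the column and scanning for an equal
-- adjacent pair, instead of A's count dictionaries re-scanned for counts above one
-- (objective: alternative).

-- ===== PORT A =====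
def clear_ordering (lst : List (Int × Int)) : Bool :=
  -- firstDict/secondDict built in one pass over lst, then scanned for a count > 1
  let p := lst.foldl
    (fun (p : PySem.Dict Int Int × PySem.Dict Int Int) item =>
      ((if p.1.contains item.1 then p.1.insert item.1 (p.1.getD item.1 0 + 1)
        else p.1.insert item.1 1),
       (if p.2.contains item.2 then p.2.insert item.2 (p.2.getD item.2 0 + 1)
        else p.2.insert item.2 1)))
    (PySem.Dict.empty, PySem.Dict.empty)
  if p.1.keys.any (fun k => p.1.getD k 0 > 1) then false
  else if p.2.keys.any (fun k => p.2.getD k 0 > 1) then false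
  else true

-- ===== PORT B =====
-- the inner 'for i in range(1, len(vals))' adjacent scan of Source B
def pvHasAdjDup : List Int → Bool
  | a :: b :: t => if a == b then true else pvHasAdjDup (b :: t)
  | _ => false

def clear_ordering_alt (lst : List (Int × Int)) : Bool :=
  -- for col in (0, 1): sort the column, return False on an equal adjacent pair
  let vals0 := PySem.List.sorted (lst.map (fun item => item.1)) (fun x => x) false
  if pvHasAdjDup vals0 then false
  else
    let vals1 := PySem.List.sorted (lst.map (fun item => item.2)) (fun x => x) false
    if pvHasAdjDup vals1 then false
    else true

-- ===== PRECONDITION & SPEC =====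
def Spec_clear_ordering (lst : List (Int × Int)) (out : Bool) : Prop := out = clear_ordering_alt lst
instance (lst : List (Int × Int)) (out : Bool) : Decidable (Spec_clear_ordering lst out) := by unfold Spec_clear_ordering; infer_instance

-- ===== CLAIM (what is proved, stated in full; the proofs are below) =====
def Claim_equal_clear_ordering : Prop := ∀ (lst : List (Int × Int)), Dom_clear_ordering lst → Spec_clear_ordering lst (clear_ordering lst)

-- ===== LEMMAS AND PROOFS =====

-- the paired fold over two independent dictionaries splits into two folds
theorem pv_foldl_pair (lst : List (Int × Int)) (a b : PySem.Dict Int Int) :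
    lst.foldl (fun p item =>
      ((if p.1.contains item.1 then p.1.insert item.1 (p.1.getD item.1 0 + 1)
        else p.1.insert item.1 1),
       (if p.2.contains item.2 then p.2.insert item.2 (p.2.getD item.2 0 + 1)
        else p.2.insert item.2 1))) (a, b)
    = (lst.foldl (fun d item =>
          if d.contains item.1 then d.insert item.1 (d.getD item.1 0 + 1)
          else d.insert item.1 1) a,
       lst.foldl (fun d item =>
          if d.contains item.2 then d.insert item.2 (d.getD item.2 0 + 1)
          else d.insert item.2 1) b) := by
  induction lst generalizing a b with
  | nil => rfl
  | cons x xs ih => simp only [List.foldl_cons]; exact ih _ _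

-- A's if/else counting step is the single insert-getD-add-one step
theorem pv_step_eq (d : PySem.Dict Int Int) (k : Int) :
    (if d.contains k then d.insert k (d.getD k 0 + 1) else d.insert k 1)
      = d.insert k (d.getD k 0 + 1) := by
  by_cases h : d.contains k = true
  · simp [h]
  · have h' : d.contains k = false := by simpa using h
    rw [if_neg (by simp [h']), PySem.Dict.getD_of_not_contains d 0 h']
    norm_num

-- a per-column counting fold is the fold over the projected column
theorem pv_fold_col (f : (Int × Int) → Int) (l : List (Int × Int)) (d : PySem.Dict Int Int) :
    l.foldl (fun d item =>
        if d.contains (f item) then d.insert (f item) (d.getD (f item) 0 + 1)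
        else d.insert (f item) 1) d
      = (l.map f).foldl (fun d k => d.insert k (d.getD k 0 + 1)) d := by
  induction l generalizing d with
  | nil => rfl
  | cons x xs ih => rw [List.map_cons, List.foldl_cons, List.foldl_cons, pv_step_eq]; exact ih _

theorem pv_keys_fold (xs : List Int) :
    (xs.foldl (fun d k => d.insert k (d.getD k 0 + 1)) (PySem.Dict.empty : PySem.Dict Int Int)).keys
      = PySem.Set.ofList xs := by
  rw [PySem.Dict.keys_foldl_insert]
  simp [PySem.Dict.keys_empty, PySem.Set.update_nil_left]

-- A's count-scan verdict per column: no count above one ↔ the column has no duplicates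
theorem pv_column_a (xs : List Int) :
    ((PySem.Set.ofList xs).any (fun k =>
        ((xs.foldl (fun d k => d.insert k (d.getD k 0 + 1))
            (PySem.Dict.empty : PySem.Dict Int Int)).getD k 0 > 1)) = false)
      ↔ xs.Nodup := by
  constructor
  · intro h
    rw [List.nodup_iff_count_le_one]
    intro a
    by_cases ha : a ∈ xs
    · have h2 := (List.any_eq_false.1 h) a (by simpa [PySem.Set.mem_ofList] using ha)
      rw [PySem.Dict.getD_foldl_insert_add_one] at h2
      simp only [PySem.Dict.getD_empty, decide_eq_true_eq, not_lt] at h2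
      omega
    · simp [List.count_eq_zero_of_not_mem ha]
  · intro h
    rw [List.any_eq_false]
    intro a _
    rw [PySem.Dict.getD_foldl_insert_add_one]
    have := List.nodup_iff_count_le_one.1 h a
    simp only [PySem.Dict.getD_empty, decide_eq_true_eq, not_lt]
    omega

-- on a ≤-sorted list, no equal adjacent pair ↔ no duplicates
theorem pv_adj_nodup (l : List Int) (hs : l.Pairwise (· ≤ ·)) :
    pvHasAdjDup l = false ↔ l.Nodup := by
  induction l with
  | nil => simp [pvHasAdjDup]
  | cons a t ih =>
    cases t with
    | nil => simp [pvHasAdjDup]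
    | cons b u =>
      rcases List.pairwise_cons.1 hs with ⟨hab, htail⟩
      by_cases h : a = b
      · subst h
        simp [pvHasAdjDup]
      · have hlt : a < b := lt_of_le_of_ne (hab b (by simp)) h
        have hbu : ∀ x ∈ u, b ≤ x := fun x hx =>
          (List.pairwise_cons.1 htail).1 x hx
        rw [show pvHasAdjDup (a :: b :: u) = pvHasAdjDup (b :: u) by
              simp [pvHasAdjDup, h]]
        rw [ih htail]
        constructor
        · intro hn
          refine List.nodup_cons.2 ⟨?_, hn⟩
          intro hmem
          rcases List.mem_cons.1 hmem with h1 | h2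
          · exact h h1
          · exact absurd (lt_of_lt_of_le hlt (hbu a h2)) (lt_irrefl a)
        · intro hn
          exact (List.nodup_cons.1 hn).2

-- B's verdict per column: sorted adjacent scan ↔ no duplicates in the column
theorem pv_column_b (xs : List Int) :
    (pvHasAdjDup (PySem.List.sorted xs (fun x => x) false) = false) ↔ xs.Nodup := by
  rw [pv_adj_nodup _ (by simpa using PySem.List.sorted_pairwise xs (fun x => x))]
  exact (PySem.List.sorted_perm xs (fun x => x) false).nodup_iff

-- turn a "= false ↔ P" characterisation into a Bool equation
theorem pv_bool_of_iff (b : Bool) (P : Prop) [Decidable P] (h : b = false ↔ P) :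
    b = !decide P := by
  by_cases hp : P
  · simp [hp, h.2 hp]
  · cases hb : b
    · exact absurd (h.1 hb) hp
    · simp [hp]

-- ===== VERDICT (by name: the statement is the Claim_ definition above) =====
theorem clear_ordering_spec : Claim_equal_clear_ordering := by
  intro lst _
  unfold Spec_clear_ordering clear_ordering clear_ordering_alt
  dsimp only
  rw [pv_foldl_pair]
  simp only [pv_fold_col (fun item => item.1), pv_fold_col (fun item => item.2), pv_keys_fold]
  rw [pv_bool_of_iff _ _ (pv_column_a (lst.map (fun item => item.1))),
      pv_bool_of_iff _ _ (pv_column_a (lst.map (fun item => item.2))),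
      pv_bool_of_iff _ _ (pv_column_b (lst.map (fun item => item.1))),
      pv_bool_of_iff _ _ (pv_column_b (lst.map (fun item => item.2)))]
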